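-- pv_equiv track=rewrite | github.com/vsdip/vsdStdCellCharacterizer_sky130 | CDMChar.py | convert_logical
-- ===== SOURCE A (Python) =====
-- def convert_logical(logic_func):
--     """ Converts the func as per format needed by the truths module"""
--     logic_operator = {'.': '&',
--                       '+': '|',
--                       '~': 'not',
--                       'XOR': '^',
--                       'xor': '^'}
--
--     for exp in logic_operator.keys():
--         logic_func = logic_func.replace(exp, logic_operator[exp])
--
--     return logic_func
-- ===== SOURCE B (Python) =====
-- def convert_logical(logic_func):
--     """ Converts the func as per format needed by the truths module"""
--     # One left-to-right scan instead of five sequential full-string replace passes.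
--     single = {'.': '&', '+': '|', '~': 'not'}
--     out = []
--     i = 0
--     n = len(logic_func)
--     while i < n:
--         s3 = logic_func[i:i + 3]
--         if s3 in ('XOR', 'xor'):
--             out.append('^')
--             i += 3
--         else:
--             c = logic_func[i]
--             out.append(single.get(c, c))
--             i += 1
--     return ''.join(out)
-- ===== Notes on version B (the rewrite author's own statement) =====
-- stated objective: alternative
-- what changed: A runs five sequential full-string replace passes, one per operator token; B makes a single left-to-right scan over the characters, substituting each single-character operator and each three-character token in one traversal.
import Mathlib
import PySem

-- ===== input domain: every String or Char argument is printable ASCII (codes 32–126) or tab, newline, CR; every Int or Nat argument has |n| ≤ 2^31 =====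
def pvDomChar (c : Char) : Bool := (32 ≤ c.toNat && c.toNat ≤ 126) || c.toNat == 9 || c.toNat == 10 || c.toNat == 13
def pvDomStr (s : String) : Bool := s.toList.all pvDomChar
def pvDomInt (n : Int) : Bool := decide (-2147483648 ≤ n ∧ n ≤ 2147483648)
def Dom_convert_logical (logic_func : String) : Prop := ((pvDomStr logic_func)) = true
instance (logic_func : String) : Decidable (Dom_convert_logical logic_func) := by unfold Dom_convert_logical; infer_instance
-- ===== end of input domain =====

-- B replaces A's five sequential full-string replace passes by one left-to-right scan
-- substituting every operator token in a single traversal (objective: alternative).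

-- ===== PORT A =====
-- literal transliteration of A: a dict of substitutions, then a loop over its keys,
-- each iteration a full-string str.replace.
def convert_logical (logic_func : String) : String :=
  let logic_operator : PySem.Dict String String :=
    ((((PySem.Dict.empty.insert "." "&").insert "+" "|").insert "~" "not").insert "XOR" "^").insert "xor" "^"
  logic_operator.keys.foldl
    (fun lf exp => PySem.Str.replace lf exp (logic_operator.getD exp ""))
    logic_func

-- ===== PORT B =====
-- transliteration of Source B's scanning loop over the characters: at each position look at
-- the 3-character slice (take 3; advancing i by 3 = drop), else substitute one character.
def convertAltGo (l : List Char) : List Char :=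
  match l with
  | [] => []
  | c :: t =>
    if (c :: t).take 3 = ['X', 'O', 'R'] ∨ (c :: t).take 3 = ['x', 'o', 'r'] then
      '^' :: convertAltGo (t.drop 2)
    else if c = '.' then '&' :: convertAltGo t
    else if c = '+' then '|' :: convertAltGo t
    else if c = '~' then 'n' :: 'o' :: 't' :: convertAltGo t
    else c :: convertAltGo t
termination_by l.length
decreasing_by
  · simp [List.length_drop]
  all_goals simp

def convert_logical_alt (logic_func : String) : String :=
  String.ofList (convertAltGo logic_func.toList)

-- ===== PRECONDITION & SPEC =====
def Spec_convert_logical (logic_func : String) (out : String) : Prop := out = convert_logical_alt logic_func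
instance (logic_func : String) (out : String) : Decidable (Spec_convert_logical logic_func out) := by unfold Spec_convert_logical; infer_instance

-- ===== CLAIM (what is proved, stated in full; the proofs are below) =====
def Claim_equal_convert_logical : Prop := ∀ (logic_func : String), Dom_convert_logical logic_func → Spec_convert_logical logic_func (convert_logical logic_func)

-- ===== LEMMAS AND PROOFS =====

-- fuel-free recursive form of PySem.Chars.replace (for nonempty `old`)
def replRec (old new : List Char) : List Char → List Char
  | [] => []
  | c :: t =>
    if old.isPrefixOf (c :: t) then new ++ replRec old new (t.drop (old.length - 1))
    else c :: replRec old new t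
termination_by l => l.length
decreasing_by
  · simp [List.length_drop]
  all_goals simp

theorem replRec_nil (old new : List Char) : replRec old new [] = [] := by
  simp [replRec]

theorem replRec_cons_pos {old : List Char} (new : List Char) {c : Char} {t : List Char}
    (h : old.isPrefixOf (c :: t)) :
    replRec old new (c :: t) = new ++ replRec old new (t.drop (old.length - 1)) := by
  rw [replRec]; simp [h]

theorem replRec_cons_neg {old : List Char} (new : List Char) {c : Char} {t : List Char}
    (h : ¬ old.isPrefixOf (c :: t)) :
    replRec old new (c :: t) = c :: replRec old new t := by
  rw [replRec]; simp [h]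

theorem replRec_neg_head {a : Char} {os : List Char} (new : List Char) {c : Char}
    (t : List Char) (h : c ≠ a) :
    replRec (a :: os) new (c :: t) = c :: replRec (a :: os) new t := by
  apply replRec_cons_neg
  simp [List.isPrefixOf]
  exact fun e => absurd e.symm h

theorem replace_go_eq (old new : List Char) (hold : old ≠ []) :
    ∀ (fuel : Nat) (l acc : List Char), l.length ≤ fuel →
      PySem.Chars.replace.go old new fuel l acc = acc.reverse ++ replRec old new l := by
  intro fuel
  induction fuel with
  | zero =>
    intro l acc hl
    have : l = [] := by cases l <;> simp_all
    subst this
    rw [PySem.Chars.replace.go.eq_def]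
    simp [replRec_nil]
  | succ n ih =>
    intro l acc hl
    cases l with
    | nil =>
      rw [PySem.Chars.replace.go.eq_def]
      simp [replRec_nil]
    | cons c t =>
      rw [PySem.Chars.replace.go.eq_def]
      by_cases h : old.isPrefixOf (c :: t)
      · simp only [h, if_true]
        have hdrop : List.drop old.length (c :: t) = t.drop (old.length - 1) := by
          cases old with
          | nil => exact absurd rfl hold
          | cons o os => simp
        rw [hdrop]
        have hlen : (t.drop (old.length - 1)).length ≤ n := by
          simp [List.length_drop] at *; omega
        rw [ih _ _ hlen, replRec_cons_pos new h]
        simp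
      · simp only [h]
        have hlen : t.length ≤ n := by simp at hl; omega
        rw [ih _ _ hlen, replRec_cons_neg new h]
        simp

theorem replace_eq_replRec (l old new : List Char) (hold : old ≠ []) :
    PySem.Chars.replace l old new = replRec old new l := by
  unfold PySem.Chars.replace
  have : old.isEmpty = false := by cases old <;> simp_all
  rw [this]
  simpa using replace_go_eq old new hold l.length l [] (le_refl _)

-- single-character replace is a flatMap
theorem replRec_single (a : Char) (new : List Char) (l : List Char) :
    replRec [a] new l = l.flatMap (fun c => if c = a then new else [c]) := by
  induction l with
  | nil => simp [replRec_nil]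
  | cons c t ih =>
    by_cases h : c = a
    · subst h
      have hp : List.isPrefixOf [c] (c :: t) := by simp [List.isPrefixOf]
      rw [replRec_cons_pos new hp]
      simp [ih]
    · rw [replRec_neg_head new t h]
      simp [ih, h]

-- the combined single-character substitution of B's scan
def msub (c : Char) : List Char :=
  if c = '.' then ['&'] else if c = '+' then ['|'] else if c = '~' then ['n', 'o', 't'] else [c]

theorem three_singles (l : List Char) :
    replRec ['~'] ['n', 'o', 't'] (replRec ['+'] ['|'] (replRec ['.'] ['&'] l))
      = l.flatMap msub := by
  rw [replRec_single, replRec_single, replRec_single, List.flatMap_assoc, List.flatMap_assoc]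
  congr 1
  funext c
  by_cases h1 : c = '.' <;> by_cases h2 : c = '+' <;> by_cases h3 : c = '~' <;>
    simp_all [msub]

-- abbreviations for the three passes
def Fm (l : List Char) : List Char := l.flatMap msub
def R1 (w : List Char) : List Char := replRec ['X', 'O', 'R'] ['^'] w
def R2 (w : List Char) : List Char := replRec ['x', 'o', 'r'] ['^'] w

theorem Fm_cons (c : Char) (t : List Char) : Fm (c :: t) = msub c ++ Fm t := by
  simp [Fm]

theorem msub_id {c : Char} (h1 : c ≠ '.') (h2 : c ≠ '+') (h3 : c ≠ '~') : msub c = [c] := by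
  simp [msub, h1, h2, h3]

-- prefix transfer lemmas: a 1- or 2-character pattern survives Fm and R1 unchanged
theorem single_prefix_Fm (b : Char)
    (hb : b ≠ '&' ∧ b ≠ '|' ∧ b ≠ 'n' ∧ b ≠ '.' ∧ b ≠ '+' ∧ b ≠ '~') (u : List Char) :
    List.isPrefixOf [b] (Fm u) = List.isPrefixOf [b] u := by
  cases u with
  | nil => simp [Fm]
  | cons e v =>
    rw [Fm_cons]
    by_cases h1 : e = '.'
    · subst h1
      simp [msub, List.isPrefixOf, hb.1, hb.2.2.2.1]
    by_cases h2 : e = '+'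
    · subst h2
      simp [msub, List.isPrefixOf, hb.2.1, hb.2.2.2.2.1]
    by_cases h3 : e = '~'
    · subst h3
      simp [msub, List.isPrefixOf, hb.2.2.1, hb.2.2.2.2.2]
    · rw [msub_id h1 h2 h3]
      simp [List.isPrefixOf]

theorem pair_prefix_Fm (b c' : Char)
    (hb : b ≠ '&' ∧ b ≠ '|' ∧ b ≠ 'n' ∧ b ≠ '.' ∧ b ≠ '+' ∧ b ≠ '~')
    (hc : c' ≠ '&' ∧ c' ≠ '|' ∧ c' ≠ 'n' ∧ c' ≠ '.' ∧ c' ≠ '+' ∧ c' ≠ '~') (t : List Char) :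
    List.isPrefixOf [b, c'] (Fm t) = List.isPrefixOf [b, c'] t := by
  cases t with
  | nil => simp [Fm]
  | cons d u =>
    rw [Fm_cons]
    by_cases h1 : d = '.'
    · subst h1
      simp [msub, List.isPrefixOf, beq_eq_false_iff_ne.mpr hb.1,
        beq_eq_false_iff_ne.mpr hb.2.2.2.1]
    by_cases h2 : d = '+'
    · subst h2
      simp [msub, List.isPrefixOf, beq_eq_false_iff_ne.mpr hb.2.1,
        beq_eq_false_iff_ne.mpr hb.2.2.2.2.1]
    by_cases h3 : d = '~'
    · subst h3
      simp [msub, List.isPrefixOf, beq_eq_false_iff_ne.mpr hb.2.2.1,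
        beq_eq_false_iff_ne.mpr hb.2.2.2.2.2]
    · rw [msub_id h1 h2 h3]
      simp only [List.cons_append, List.nil_append, List.isPrefixOf,
        single_prefix_Fm c' hc u]

theorem single_prefix_R1 (b : Char) (hb : b ≠ '^' ∧ b ≠ 'X') (v : List Char) :
    List.isPrefixOf [b] (replRec ['X', 'O', 'R'] ['^'] v) = List.isPrefixOf [b] v := by
  cases v with
  | nil => simp [replRec_nil]
  | cons e u =>
    by_cases h : List.isPrefixOf ['X', 'O', 'R'] (e :: u)
    · have he : e = 'X' := by
        simp [List.isPrefixOf] at h; exact h.1.symm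
      rw [replRec_cons_pos _ h, he]
      simp [List.isPrefixOf, beq_eq_false_iff_ne.mpr hb.1, beq_eq_false_iff_ne.mpr hb.2]
    · rw [replRec_cons_neg _ h]
      simp [List.isPrefixOf]

theorem pair_prefix_R1 (b c' : Char) (hb : b ≠ '^' ∧ b ≠ 'X')
    (hc : c' ≠ '^' ∧ c' ≠ 'X') (w : List Char) :
    List.isPrefixOf [b, c'] (replRec ['X', 'O', 'R'] ['^'] w) = List.isPrefixOf [b, c'] w := by
  cases w with
  | nil => simp [replRec_nil]
  | cons d v =>
    by_cases h : List.isPrefixOf ['X', 'O', 'R'] (d :: v)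
    · have hd : d = 'X' := by
        simp [List.isPrefixOf] at h; exact h.1.symm
      rw [replRec_cons_pos _ h, hd]
      simp [List.isPrefixOf, beq_eq_false_iff_ne.mpr hb.1, beq_eq_false_iff_ne.mpr hb.2]
    · rw [replRec_cons_neg _ h]
      simp only [List.isPrefixOf, single_prefix_R1 c' hc v]

-- destructor for a matched 2-pattern
theorem prefix_pair_exists {a b : Char} {t : List Char}
    (h : List.isPrefixOf [a, b] t) : ∃ u, t = a :: b :: u := by
  cases t with
  | nil => simp [List.isPrefixOf] at h
  | cons c v =>
    cases v with
    | nil => simp [List.isPrefixOf] at h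
    | cons d u =>
      simp [List.isPrefixOf] at h
      exact ⟨u, by simp [h.1, h.2]⟩

-- unfolds of convertAltGo
theorem altGo_nil : convertAltGo [] = [] := by simp [convertAltGo]

theorem altGo_XOR (u : List Char) :
    convertAltGo ('X' :: 'O' :: 'R' :: u) = '^' :: convertAltGo u := by
  rw [convertAltGo]; simp

theorem altGo_xor (u : List Char) :
    convertAltGo ('x' :: 'o' :: 'r' :: u) = '^' :: convertAltGo u := by
  rw [convertAltGo]; simp

theorem take3_eq_iff (c a b d : Char) (t : List Char) :
    ((c :: t).take 3 = [a, b, d]) ↔ (c = a ∧ List.isPrefixOf [b, d] t) := by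
  cases t with
  | nil => simp [List.isPrefixOf]
  | cons e v =>
    cases v with
    | nil => simp [List.isPrefixOf]
    | cons f u =>
      simp only [List.take_succ_cons, List.take_zero, List.isPrefixOf,
        Bool.and_eq_true, beq_iff_eq, List.cons.injEq, and_true]
      constructor
      · rintro ⟨ha, hb, hd⟩; exact ⟨ha, hb.symm, hd.symm⟩
      · rintro ⟨ha, hb, hd⟩; exact ⟨ha, hb.symm, hd.symm⟩

theorem altGo_cons_other (c : Char) (t : List Char)
    (hX : ¬ (c = 'X' ∧ List.isPrefixOf ['O', 'R'] t))
    (hx : ¬ (c = 'x' ∧ List.isPrefixOf ['o', 'r'] t)) :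
    convertAltGo (c :: t) = msub c ++ convertAltGo t := by
  rw [convertAltGo]
  have h3 : ¬ ((c :: t).take 3 = ['X', 'O', 'R'] ∨ (c :: t).take 3 = ['x', 'o', 'r']) := by
    rw [take3_eq_iff, take3_eq_iff]
    tauto
  rw [if_neg h3]
  by_cases h1 : c = '.'
  · subst h1; simp [msub]
  by_cases h2 : c = '+'
  · subst h2; simp [msub]
  by_cases h4 : c = '~'
  · subst h4; simp [msub]
  · rw [msub_id h1 h2 h4]
    simp [h1, h2, h4]

-- the key step: outside a triple match the head character is substituted alone
theorem step_other (c : Char) (t : List Char)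
    (hX : ¬ (c = 'X' ∧ List.isPrefixOf ['O', 'R'] t))
    (hx : ¬ (c = 'x' ∧ List.isPrefixOf ['o', 'r'] t)) :
    R2 (R1 (Fm (c :: t))) = msub c ++ R2 (R1 (Fm t)) := by
  by_cases h1 : c = '.'
  · subst h1
    rw [Fm_cons, show msub '.' = ['&'] from by decide]
    simp only [List.cons_append, List.nil_append]
    rw [R1, replRec_neg_head _ _ (by decide), R2, replRec_neg_head _ _ (by decide)]
    rfl
  by_cases h2 : c = '+'
  · subst h2
    rw [Fm_cons, show msub '+' = ['|'] from by decide]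
    simp only [List.cons_append, List.nil_append]
    rw [R1, replRec_neg_head _ _ (by decide), R2, replRec_neg_head _ _ (by decide)]
    rfl
  by_cases h3 : c = '~'
  · subst h3
    rw [Fm_cons, show msub '~' = ['n', 'o', 't'] from by decide]
    simp only [List.cons_append, List.nil_append]
    rw [R1, replRec_neg_head _ _ (by decide), replRec_neg_head _ _ (by decide),
      replRec_neg_head _ _ (by decide),
      R2, replRec_neg_head _ _ (by decide), replRec_neg_head _ _ (by decide),
      replRec_neg_head _ _ (by decide)]
    rfl
  -- now msub c = [c]
  rw [Fm_cons, msub_id h1 h2 h3]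
  simp only [List.cons_append, List.nil_append]
  by_cases hXc : c = 'X'
  · subst hXc
    have hOR : ¬ List.isPrefixOf ['O', 'R'] t := fun h => hX ⟨rfl, h⟩
    have hOR' : ¬ List.isPrefixOf ['O', 'R'] (Fm t) := by
      rw [pair_prefix_Fm 'O' 'R' (by decide) (by decide)]; exact hOR
    have hstep : R1 ('X' :: Fm t) = 'X' :: R1 (Fm t) := by
      rw [R1]
      apply replRec_cons_neg
      simp only [List.isPrefixOf, Bool.and_eq_true, beq_iff_eq]
      intro h
      exact hOR' (by simpa [List.isPrefixOf] using h.2)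
    rw [hstep, R2, replRec_neg_head _ _ (by decide)]
    rfl
  by_cases hxc : c = 'x'
  · subst hxc
    have hor : ¬ List.isPrefixOf ['o', 'r'] t := fun h => hx ⟨rfl, h⟩
    have hor2 : ¬ List.isPrefixOf ['o', 'r'] (replRec ['X', 'O', 'R'] ['^'] (Fm t)) := by
      rw [pair_prefix_R1 'o' 'r' (by decide) (by decide),
        pair_prefix_Fm 'o' 'r' (by decide) (by decide)]
      exact hor
    rw [R1, replRec_neg_head _ _ (by decide), R2]
    rw [replRec_cons_neg _ (by
      simp only [List.isPrefixOf, Bool.and_eq_true, beq_iff_eq]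
      intro h
      exact hor2 (by simpa [List.isPrefixOf] using h.2))]
    rfl
  · rw [R1, replRec_neg_head _ _ hXc, R2, replRec_neg_head _ _ hxc]
    rfl

-- the main scan equivalence, by strong induction on length
theorem comp_eq_altGo : ∀ (n : Nat) (l : List Char), l.length ≤ n →
    R2 (R1 (Fm l)) = convertAltGo l := by
  intro n
  induction n with
  | zero =>
    intro l hl
    have : l = [] := by cases l <;> simp_all
    subst this
    simp [Fm, R1, R2, replRec_nil, altGo_nil]
  | succ n ih =>
    intro l hl
    cases l with
    | nil => simp [Fm, R1, R2, replRec_nil, altGo_nil]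
    | cons c t =>
      by_cases hX : c = 'X' ∧ List.isPrefixOf ['O', 'R'] t
      · obtain ⟨rfl, hpre⟩ := hX
        obtain ⟨u, rfl⟩ := prefix_pair_exists hpre
        have hm : Fm ('X' :: 'O' :: 'R' :: u) = 'X' :: 'O' :: 'R' :: Fm u := by
          simp [Fm, msub]
        have hp : List.isPrefixOf ['X', 'O', 'R'] ('X' :: 'O' :: 'R' :: Fm u) := by
          simp [List.isPrefixOf]
        have h1 : R1 (Fm ('X' :: 'O' :: 'R' :: u)) = '^' :: R1 (Fm u) := by
          rw [hm, R1, replRec_cons_pos _ hp]; rfl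
        rw [h1, R2, replRec_neg_head _ _ (by decide), altGo_XOR]
        exact congrArg _ (ih u (by simp at hl; omega))
      by_cases hx : c = 'x' ∧ List.isPrefixOf ['o', 'r'] t
      · obtain ⟨rfl, hpre⟩ := hx
        obtain ⟨u, rfl⟩ := prefix_pair_exists hpre
        have hm : Fm ('x' :: 'o' :: 'r' :: u) = 'x' :: 'o' :: 'r' :: Fm u := by
          simp [Fm, msub]
        have h1 : R1 (Fm ('x' :: 'o' :: 'r' :: u)) = 'x' :: 'o' :: 'r' :: R1 (Fm u) := by
          rw [hm, R1, replRec_neg_head _ _ (by decide), replRec_neg_head _ _ (by decide),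
            replRec_neg_head _ _ (by decide)]
          rfl
        have hp : List.isPrefixOf ['x', 'o', 'r'] ('x' :: 'o' :: 'r' :: R1 (Fm u)) := by
          simp [List.isPrefixOf]
        rw [h1, R2, replRec_cons_pos _ hp, altGo_xor]
        show '^' :: R2 (R1 (Fm u)) = '^' :: convertAltGo u
        rw [ih u (by simp at hl; omega)]
      · rw [step_other c t hX hx, altGo_cons_other c t hX hx]
        exact congrArg _ (ih t (by simp at hl; omega))

-- A unfolds to the chain of five replaces, which is R2 ∘ R1 ∘ (three single-char passes)
theorem toList_A (s : String) :
    (convert_logical s).toList = R2 (R1 (Fm s.toList)) := by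
  have hk : (((((PySem.Dict.empty.insert "." "&").insert "+" "|").insert "~" "not").insert
      "XOR" "^").insert "xor" "^" : PySem.Dict String String).keys
      = [".", "+", "~", "XOR", "xor"] := by decide
  have h1 : (((((PySem.Dict.empty.insert "." "&").insert "+" "|").insert "~" "not").insert
      "XOR" "^").insert "xor" "^" : PySem.Dict String String).getD "." "" = "&" := by decide
  have h2 : (((((PySem.Dict.empty.insert "." "&").insert "+" "|").insert "~" "not").insert
      "XOR" "^").insert "xor" "^" : PySem.Dict String String).getD "+" "" = "|" := by decide
  have h3 : (((((PySem.Dict.empty.insert "." "&").insert "+" "|").insert "~" "not").insert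
      "XOR" "^").insert "xor" "^" : PySem.Dict String String).getD "~" "" = "not" := by decide
  have h4 : (((((PySem.Dict.empty.insert "." "&").insert "+" "|").insert "~" "not").insert
      "XOR" "^").insert "xor" "^" : PySem.Dict String String).getD "XOR" "" = "^" := by decide
  have h5 : (((((PySem.Dict.empty.insert "." "&").insert "+" "|").insert "~" "not").insert
      "XOR" "^").insert "xor" "^" : PySem.Dict String String).getD "xor" "" = "^" := by decide
  rw [convert_logical]
  simp only [hk, List.foldl_cons, List.foldl_nil, h1, h2, h3, h4, h5]
  simp only [PySem.Str.toList_replace]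
  rw [replace_eq_replRec _ _ _ (by decide), replace_eq_replRec _ _ _ (by decide),
    replace_eq_replRec _ _ _ (by decide), replace_eq_replRec _ _ _ (by decide),
    replace_eq_replRec _ _ _ (by decide)]
  show R2 (R1 (replRec ['~'] ['n', 'o', 't'] (replRec ['+'] ['|']
    (replRec ['.'] ['&'] s.toList)))) = _
  rw [three_singles]
  rfl

theorem toList_B (s : String) :
    (convert_logical_alt s).toList = convertAltGo s.toList := by
  simp [convert_logical_alt]

-- ===== VERDICT (by name: the statement is the Claim_ definition above) =====
theorem convert_logical_spec : Claim_equal_convert_logical := by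
  intro s _
  unfold Spec_convert_logical
  apply String.toList_inj.mp
  rw [toList_A, toList_B, comp_eq_altGo s.toList.length s.toList (le_refl _)]
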